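-- pv_equiv track=rewrite | github.com/lpuls/CodeExercise | JZ/JZ21.py | get_maybe
-- ===== SOURCE A (Python) =====
-- def get_maybe(index, pushV):
--     maybe = [None]
--
--     j = index - 1
--     while j >= 0:
--         if None is not pushV[j]:
--             maybe[0] = j
--             break
--         j -= 1
--
--     j = index + 1
--     while j < len(pushV):
--         if None is not pushV[j]:
--             maybe.append(j)
--         j += 1
--
--     return maybe
-- ===== SOURCE B (Python) =====
-- def get_maybe(index, pushV):
--     present = [j for j, v in enumerate(pushV) if v is not None]
--     lefts = [j for j in present if j < index]
--     left = lefts[-1] if lefts else None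
--     return [left] + [j for j in present if j > index]
-- ===== Notes on version B (the rewrite author's own statement) =====
-- stated objective: alternative
-- what changed: Replaces A's two directed index-walks (backward scan with early break, forward collect loop) by one global scan building the list of non-None indices, then partitioning it around index (last one below, all above).
-- intended difference: For index <= -2 (with index >= -len-1 so A still returns) whose Python negative-index wraparound makes the forward loop read the tail of pushV, A appends those hits as negative indices (e.g. A(-2,[5]) = [None,-1,0]) while B returns only the true non-None positions ([None,0]), which is the intended 'indices to the right' value. — e.g. on get_maybe(-2, [some 5]): A returns [none, some (-1), some 0], B returns [none, some 0]
import Mathlib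
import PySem

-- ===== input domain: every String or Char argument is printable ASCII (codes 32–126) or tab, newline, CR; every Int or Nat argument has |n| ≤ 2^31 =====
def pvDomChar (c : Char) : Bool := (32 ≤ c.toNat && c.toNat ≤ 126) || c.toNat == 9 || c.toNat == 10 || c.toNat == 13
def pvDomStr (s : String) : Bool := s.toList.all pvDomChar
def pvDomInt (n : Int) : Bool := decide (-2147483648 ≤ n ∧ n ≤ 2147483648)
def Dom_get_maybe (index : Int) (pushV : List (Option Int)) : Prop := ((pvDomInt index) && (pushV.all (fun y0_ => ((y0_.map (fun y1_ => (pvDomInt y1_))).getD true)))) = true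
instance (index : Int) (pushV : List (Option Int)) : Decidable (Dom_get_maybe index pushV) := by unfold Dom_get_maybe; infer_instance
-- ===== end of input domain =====

-- B replaces A's two directed index-walks by a single global scan over pushV collecting
-- non-None indices, then partitioning that list around `index` (same cost, different shape);
-- for index <= -2 A's wraparound reads append negative indices — B returns the intended positions (D_ below).


-- ===== PORT A =====
-- backward while loop: j from index-1 down to 0, stop at first non-None (pyGet? none = IndexError, outside Pre_)
def loopBack (pushV : List (Option Int)) (j : Int) : Option Int :=
  if _h : 0 ≤ j then
    match PySem.List.pyGet? pushV j with
    | some (some _) => some j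
    | some none => loopBack pushV (j - 1)
    | none => none
  else none
termination_by (j + 1).toNat
decreasing_by omega

-- forward while loop: j from index+1 up to len-1, append non-None hits
def loopFwd (pushV : List (Option Int)) (j : Int) (acc : List (Option Int)) : List (Option Int) :=
  if _h : j < (pushV.length : Int) then
    match PySem.List.pyGet? pushV j with
    | some (some _) => loopFwd pushV (j + 1) (acc ++ [some j])
    | some none => loopFwd pushV (j + 1) acc
    | none => acc
  else acc
termination_by ((pushV.length : Int) - j).toNat
decreasing_by all_goals omega

def get_maybe (index : Int) (pushV : List (Option Int)) : List (Option Int) :=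
  loopFwd pushV (index + 1) [loopBack pushV (index - 1)]

-- ===== PORT B =====
def get_maybe_alt (index : Int) (pushV : List (Option Int)) : List (Option Int) :=
  let present : List Int :=
    ((List.range pushV.length).filter (fun k => (pushV.getD k none).isSome)).map (fun (k : Nat) => (k : Int))
  let lefts := present.filter (fun j => j < index)
  let left : Option Int := lefts.getLast?
  left :: (present.filter (fun j => index < j)).map (fun j => some j)

-- ===== PRECONDITION & SPEC =====
-- Pre_: exactly where A returns; outside it A's first subscript raises IndexError.
def Pre_get_maybe (index : Int) (pushV : List (Option Int)) : Prop :=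
  -(pushV.length : Int) - 1 ≤ index ∧ index ≤ (pushV.length : Int)
instance (index : Int) (pushV : List (Option Int)) : Decidable (Pre_get_maybe index pushV) := by unfold Pre_get_maybe; infer_instance
def pvWitness_get_maybe : Int × List (Option Int) := (1, [some 3, none, some 5])

-- For -len(pushV)-1 ≤ index ≤ -2 with a non-None entry among the wrapped reads pushV[index+1:]...
-- concretely pushV[len+index+1:], A's forward loop hits them through Python's negative-index wraparound
-- and appends NEGATIVE indices (A(-2,[5]) = [None,-1,0]); B returns the intended non-None positions ([None,0]).
def D_get_maybe (index : Int) (pushV : List (Option Int)) : Prop :=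
  index ≤ -2 ∧ -(pushV.length : Int) - 1 ≤ index ∧
    (pushV.drop ((pushV.length : Int) + index + 1).toNat).any (fun o => o.isSome) = true
instance (index : Int) (pushV : List (Option Int)) : Decidable (D_get_maybe index pushV) := by unfold D_get_maybe; infer_instance

def Spec_get_maybe (index : Int) (pushV : List (Option Int)) (out : List (Option Int)) : Prop :=
  ¬ D_get_maybe index pushV → out = get_maybe_alt index pushV
instance (index : Int) (pushV : List (Option Int)) (out : List (Option Int)) : Decidable (Spec_get_maybe index pushV out) := by unfold Spec_get_maybe; infer_instance

def pvDiffWitness_get_maybe : Int × List (Option Int) := (-2, [some 5])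
def pvDiffWitnessOut_get_maybe : (List (Option Int)) × (List (Option Int)) :=
  ([none, some (-1), some 0], [none, some 0])

-- ===== CLAIM =====
def Claim_unchanged_get_maybe : Prop := ∀ (index : Int) (pushV : List (Option Int)), Dom_get_maybe index pushV → Pre_get_maybe index pushV → Spec_get_maybe index pushV (get_maybe index pushV)
def Claim_changed_get_maybe : Prop := Dom_get_maybe (pvDiffWitness_get_maybe.1) (pvDiffWitness_get_maybe.2) ∧ Pre_get_maybe (pvDiffWitness_get_maybe.1) (pvDiffWitness_get_maybe.2) ∧ D_get_maybe (pvDiffWitness_get_maybe.1) (pvDiffWitness_get_maybe.2) ∧ get_maybe (pvDiffWitness_get_maybe.1) (pvDiffWitness_get_maybe.2) = pvDiffWitnessOut_get_maybe.1 ∧ get_maybe_alt (pvDiffWitness_get_maybe.1) (pvDiffWitness_get_maybe.2) = pvDiffWitnessOut_get_maybe.2 ∧ pvDiffWitnessOut_get_maybe.1 ≠ pvDiffWitnessOut_get_maybe.2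

def Claim_exact_get_maybe : Prop := ∀ (index : Int) (pushV : List (Option Int)), Dom_get_maybe index pushV → Pre_get_maybe index pushV → D_get_maybe index pushV → get_maybe index pushV ≠ get_maybe_alt index pushV

-- ===== LEMMAS AND PROOFS =====

theorem loopBack_char (pushV : List (Option Int)) : ∀ (n : Nat), n ≤ pushV.length →
    loopBack pushV ((n : Int) - 1) =
      (((List.range n).filter (fun k => (pushV.getD k none).isSome)).map (fun (k : Nat) => (k : Int))).getLast? := by
  intro n
  induction n with
  | zero => intro _; rw [loopBack.eq_def]; simp
  | succ n ih =>
    intro h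
    have hn : n < pushV.length := by omega
    have hcast : ((n + 1 : Nat) : Int) - 1 = (n : Int) := by push_cast; ring
    rw [hcast, loopBack.eq_def]
    have hget : PySem.List.pyGet? pushV (n : Int) = some pushV[n] := by
      rw [PySem.List.pyGet?_natCast]; simp [List.getElem?_eq_getElem hn]
    have hgetD : pushV.getD n none = pushV[n] := by simp [List.getD_eq_getElem?_getD, List.getElem?_eq_getElem hn]
    rw [List.range_succ]
    have hg2 : pushV[n]? = some pushV[n] := List.getElem?_eq_getElem hn
    cases hv : pushV[n] with
    | some v =>
      simp only [hget, hv, dif_pos (by omega : (0:Int) ≤ (n:Int))]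
      simp [hg2, hv, List.filter_append]
    | none =>
      simp only [hget, hv, dif_pos (by omega : (0:Int) ≤ (n:Int))]
      simp [hg2, hv, List.filter_append, ih (by omega)]

theorem loopFwd_char (pushV : List (Option Int)) : ∀ (m n : Nat), m = pushV.length - n → ∀ (acc : List (Option Int)),
    loopFwd pushV (n : Int) acc =
      acc ++ (((List.range' n m).filter (fun k => (pushV.getD k none).isSome)).map (fun (k : Nat) => (some (k : Int) : Option Int))) := by
  intro m
  induction m with
  | zero =>
    intro n hm acc
    rw [loopFwd.eq_def]
    have : ¬ ((n:Int) < (pushV.length : Int)) := by omega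
    simp [this]
  | succ m ih =>
    intro n hm acc
    have hn : n < pushV.length := by omega
    have hg2 : pushV[n]? = some pushV[n] := List.getElem?_eq_getElem hn
    have hget : PySem.List.pyGet? pushV (n : Int) = some pushV[n] := by
      rw [PySem.List.pyGet?_natCast, hg2]
    rw [loopFwd.eq_def]
    have hlt : ((n:Int) < (pushV.length : Int)) := by omega
    have hstep : ((n : Int) + 1) = ((n + 1 : Nat) : Int) := by push_cast; ring
    rw [List.range'_succ]
    cases hv : pushV[n] with
    | some v =>
      simp only [hget, hv, dif_pos hlt, hstep, ih (n+1) (by omega)]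
      simp [hg2, hv]
    | none =>
      simp only [hget, hv, dif_pos hlt, hstep, ih (n+1) (by omega)]
      simp [hg2, hv]

theorem range_filter_lt (p : Nat → Bool) (len n : Nat) (h : n ≤ len) :
    ((List.range len).filter p).filter (fun k => decide (k < n)) = (List.range n).filter p := by
  have hsplit : List.range len = List.range' 0 n ++ List.range' n (len - n) := by
    rw [List.range_eq_range']
    have := @List.range'_append 0 n (len - n) 1
    simp only [one_mul, zero_add] at this
    rw [this]; congr 1; omega
  rw [hsplit, List.filter_append, List.filter_append, List.filter_filter, List.filter_filter]
  have h1 : (List.range' 0 n).filter (fun k => decide (k < n) && p k) = (List.range' 0 n).filter p := by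
    apply List.filter_congr; intro k hk
    rw [List.mem_range'] at hk
    obtain ⟨i, hi, rfl⟩ := hk
    rw [decide_eq_true (by omega : 0 + 1 * i < n), Bool.true_and]
  have h2 : (List.range' n (len - n)).filter (fun k => decide (k < n) && p k) = [] := by
    rw [List.filter_eq_nil_iff]; intro k hk
    rw [List.mem_range'] at hk
    obtain ⟨i, hi, rfl⟩ := hk
    simp only [Bool.and_eq_true, decide_eq_true_eq, not_and]
    intro h'; exact absurd h' (by omega)
  rw [h1, h2, List.append_nil, ← List.range_eq_range']

theorem range_filter_gt (p : Nat → Bool) (len n : Nat) :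
    ((List.range len).filter p).filter (fun k => decide (n < k)) = (List.range' (n+1) (len - (n+1))).filter p := by
  by_cases h : n + 1 ≤ len
  · have hsplit : List.range len = List.range' 0 (n+1) ++ List.range' (n+1) (len - (n+1)) := by
      rw [List.range_eq_range']
      have := @List.range'_append 0 (n+1) (len - (n+1)) 1
      simp only [one_mul, zero_add] at this
      rw [this]; congr 1; omega
    rw [hsplit, List.filter_append, List.filter_append, List.filter_filter, List.filter_filter]
    have h1 : (List.range' 0 (n+1)).filter (fun k => decide (n < k) && p k) = [] := by
      rw [List.filter_eq_nil_iff]; intro k hk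
      rw [List.mem_range'] at hk
      obtain ⟨i, hi, rfl⟩ := hk
      simp only [Bool.and_eq_true, decide_eq_true_eq, not_and]
      intro h'; exact absurd h' (by omega)
    have h2 : (List.range' (n+1) (len - (n+1))).filter (fun k => decide (n < k) && p k) = (List.range' (n+1) (len - (n+1))).filter p := by
      apply List.filter_congr; intro k hk
      rw [List.mem_range'] at hk
      obtain ⟨i, hi, rfl⟩ := hk
      rw [decide_eq_true (by omega : n < n + 1 + 1 * i), Bool.true_and]
    rw [h1, h2, List.nil_append]
  · have hz : len - (n+1) = 0 := by omega
    rw [hz]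
    simp only [List.range'_zero, List.filter_nil]
    rw [List.filter_filter, List.filter_eq_nil_iff]
    intro k hk
    rw [List.mem_range] at hk
    simp only [Bool.and_eq_true, decide_eq_true_eq, not_and]
    intro h'; exact absurd h' (by omega)

theorem loopFwd_neg (pushV : List (Option Int)) : ∀ (c : Nat), c ≤ pushV.length →
    (∀ o ∈ pushV.drop (pushV.length - c), o = none) → ∀ acc,
    loopFwd pushV (-(c : Int)) acc = loopFwd pushV ((0:Nat) : Int) acc := by
  intro c
  induction c with
  | zero => intro _ _ acc; norm_num
  | succ c ih =>
    intro hc hnone acc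
    have hlen : 0 < pushV.length := by omega
    rw [loopFwd.eq_def]
    have hlt : (-( (c+1 : Nat) : Int)) < (pushV.length : Int) := by push_cast; omega
    have hget : PySem.List.pyGet? pushV (-((c+1 : Nat) : Int)) = pushV[pushV.length - (c+1)]? :=
      PySem.List.pyGet?_neg_natCast pushV (c+1) (by omega) (by omega)
    have hi : pushV.length - (c+1) < pushV.length := by omega
    have hmem : pushV[pushV.length - (c+1)] ∈ pushV.drop (pushV.length - (c+1)) := by
      have h0 : (pushV.drop (pushV.length - (c+1)))[0]'(by simp; omega) = pushV[pushV.length - (c+1)] := by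
        rw [List.getElem_drop]; congr 1
      rw [← h0]; exact List.getElem_mem _
    have hval : pushV[pushV.length - (c+1)] = none := hnone _ hmem
    rw [hget]
    simp only [List.getElem?_eq_getElem hi, hval, dif_pos hlt]
    have hstep : (-((c+1 : Nat) : Int)) + 1 = -((c : Nat) : Int) := by push_cast; ring
    rw [hstep]
    apply ih (by omega)
    intro o ho
    apply hnone
    have : pushV.drop (pushV.length - c) = List.drop ((pushV.length - (c+1)) + (1:Nat)) pushV := by congr 1; omega
    rw [this, ← List.drop_drop] at ho
    exact List.drop_subset _ _ ho

theorem get_maybe_agree (index : Int) (pushV : List (Option Int))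
    (hpre1 : -(pushV.length : Int) - 1 ≤ index) (hpre2 : index ≤ (pushV.length : Int))
    (hnD : ¬ (index ≤ -2 ∧ -(pushV.length : Int) - 1 ≤ index ∧
      (pushV.drop ((pushV.length : Int) + index + 1).toNat).any (fun o => o.isSome) = true)) :
    get_maybe index pushV = get_maybe_alt index pushV := by
  simp only [get_maybe, get_maybe_alt]
  by_cases hix : 0 ≤ index
  · -- nonnegative index
    set n := index.toNat with hn
    have hnlen : n ≤ pushV.length := by omega
    have hidx : index = (n : Int) := by omega
    rw [hidx, loopBack_char pushV n hnlen,
      show ((n : Int) + 1) = ((n + 1 : Nat) : Int) by push_cast; ring,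
      loopFwd_char pushV (pushV.length - (n+1)) (n+1) rfl]
    have hlf : (((List.range pushV.length).filter (fun k => (pushV.getD k none).isSome)).map (fun k : Nat => (k:Int))).filter (fun j => decide (j < (n:Int)))
        = ((List.range n).filter (fun k => (pushV.getD k none).isSome)).map (fun k : Nat => (k:Int)) := by
      rw [List.filter_map,
        show ((fun j => decide (j < (n:Int))) ∘ fun k : Nat => (k:Int)) = fun k : Nat => decide (k < n) by
          funext k; simp,
        range_filter_lt _ pushV.length n hnlen]
    have hrf : (((List.range pushV.length).filter (fun k => (pushV.getD k none).isSome)).map (fun k : Nat => (k:Int))).filter (fun j => decide ((n:Int) < j))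
        = ((List.range' (n+1) (pushV.length - (n+1))).filter (fun k => (pushV.getD k none).isSome)).map (fun k : Nat => (k:Int)) := by
      rw [List.filter_map,
        show ((fun j => decide ((n:Int) < j)) ∘ fun k : Nat => (k:Int)) = fun k : Nat => decide (n < k) by
          funext k; simp,
        range_filter_gt _ pushV.length n]
    rw [hlf, hrf, List.singleton_append, List.map_map]
    simp [Function.comp]
  · -- negative index: the backward walk returns None and the forward walk reads from position 0 on
    have hback : loopBack pushV (index - 1) = none := by
      rw [loopBack.eq_def, dif_neg (by omega : ¬ (0 ≤ index - 1))]
    have hlefts : (((List.range pushV.length).filter (fun k => (pushV.getD k none).isSome)).map (fun k : Nat => (k:Int))).filter (fun j => decide (j < index)) = [] := by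
      rw [List.filter_eq_nil_iff]
      intro j hj
      rw [List.mem_map] at hj
      obtain ⟨k, _, rfl⟩ := hj
      simp only [decide_eq_true_eq, not_lt]
      omega
    have hrights : (((List.range pushV.length).filter (fun k => (pushV.getD k none).isSome)).map (fun k : Nat => (k:Int))).filter (fun j => decide (index < j))
        = ((List.range pushV.length).filter (fun k => (pushV.getD k none).isSome)).map (fun k : Nat => (k:Int)) := by
      rw [List.filter_eq_self]
      intro j hj
      rw [List.mem_map] at hj
      obtain ⟨k, _, rfl⟩ := hj
      simp only [decide_eq_true_eq]
      omega
    have hfwd0 : loopFwd pushV ((0:Nat) : Int) [(none : Option Int)] =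
        [(none : Option Int)] ++ ((List.range' 0 pushV.length).filter (fun k => (pushV.getD k none).isSome)).map (fun (k : Nat) => (some (k : Int) : Option Int)) := by
      have := loopFwd_char pushV pushV.length 0 rfl [(none : Option Int)]
      simpa using this
    have hfwd : loopFwd pushV (index + 1) [(none : Option Int)] =
        [(none : Option Int)] ++ ((List.range' 0 pushV.length).filter (fun k => (pushV.getD k none).isSome)).map (fun (k : Nat) => (some (k : Int) : Option Int)) := by
      by_cases hone : index = -1
      · rw [hone, show ((-1:Int) + 1) = ((0:Nat) : Int) by norm_num, hfwd0]
      · have hle : index ≤ -2 := by omega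
        have hany : ∀ o ∈ pushV.drop ((pushV.length : Int) + index + 1).toNat, o = none := by
          intro o ho
          by_contra hno
          apply hnD
          refine ⟨hle, hpre1, ?_⟩
          rw [List.any_eq_true]
          exact ⟨o, ho, by cases o <;> simp_all⟩
        have hcl : (-(index+1)).toNat ≤ pushV.length := by omega
        have hc0 : index + 1 = -(((-(index+1)).toNat : Nat) : Int) := by omega
        rw [hc0]
        rw [loopFwd_neg pushV (-(index+1)).toNat hcl (by
          intro o ho
          apply hany
          rwa [show ((pushV.length : Int) + index + 1).toNat = pushV.length - (-(index+1)).toNat from by omega] ) ]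
        exact hfwd0
    rw [hback, hfwd, hlefts, hrights, List.singleton_append, List.map_map, List.range_eq_range']
    simp [Function.comp]



theorem mem_loopFwd_acc (pushV : List (Option Int)) : ∀ (m : Nat) (j : Int) (acc : List (Option Int)) (x : Option Int),
    m = ((pushV.length : Int) - j).toNat → x ∈ acc → x ∈ loopFwd pushV j acc := by
  intro m
  induction m with
  | zero =>
    intro j acc x hm hx
    rw [loopFwd.eq_def, dif_neg (by omega : ¬ (j < (pushV.length : Int)))]
    exact hx
  | succ m ih =>
    intro j acc x hm hx
    rw [loopFwd.eq_def, dif_pos (by omega : j < (pushV.length : Int))]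
    cases hg : PySem.List.pyGet? pushV j with
    | none => exact hx
    | some w =>
      cases w with
      | none => exact ih (j+1) acc x (by omega) hx
      | some v => exact ih (j+1) (acc ++ [some j]) x (by omega) (List.mem_append_left _ hx)

theorem loopFwd_mem_hit (pushV : List (Option Int)) : ∀ (m : Nat) (j : Int) (acc : List (Option Int)),
    m = ((pushV.length : Int) - j).toNat → -(pushV.length : Int) ≤ j →
    ∀ (j' : Int) (v : Int), j ≤ j' → j' < 0 → PySem.List.pyGet? pushV j' = some (some v) →
    some j' ∈ loopFwd pushV j acc := by
  intro m
  induction m with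
  | zero =>
    intro j acc hm hj j' v hle hneg hget
    omega
  | succ m ih =>
    intro j acc hm hj j' v hle hneg hget
    have hjlt : j < (pushV.length : Int) := by omega
    rw [loopFwd.eq_def, dif_pos hjlt]
    have hjneg : j < 0 := by omega
    have hk1 : 0 < (-j).toNat := by omega
    have hk2 : (-j).toNat ≤ pushV.length := by omega
    have hjc : j = -(((-j).toNat : Nat) : Int) := by omega
    have hlt : pushV.length - (-j).toNat < pushV.length := by omega
    have hg : PySem.List.pyGet? pushV j = some pushV[pushV.length - (-j).toNat] := by
      conv_lhs => rw [hjc]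
      rw [PySem.List.pyGet?_neg_natCast pushV (-j).toNat hk1 hk2,
        List.getElem?_eq_getElem hlt]
    rcases eq_or_lt_of_le hle with heq | hlt'
    · subst heq
      rw [hget]
      exact mem_loopFwd_acc pushV ((pushV.length : Int) - (j+1)).toNat (j+1) (acc ++ [some j]) (some j) rfl
        (List.mem_append_right _ (by simp))
    · rw [hg]
      cases hv : pushV[pushV.length - (-j).toNat] with
      | none => exact ih (j+1) acc (by omega) (by omega) j' v (by omega) hneg hget
      | some w => exact ih (j+1) (acc ++ [some j]) (by omega) (by omega) j' v (by omega) hneg hget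

theorem mem_alt_shape (index : Int) (pushV : List (Option Int)) (x : Option Int)
    (hx : x ∈ get_maybe_alt index pushV) : x = none ∨ ∃ k : Nat, x = some (k : Int) := by
  simp only [get_maybe_alt, List.mem_cons] at hx
  rcases hx with hx | hx
  · cases hgl : (((((List.range pushV.length).filter (fun k => (pushV.getD k none).isSome)).map (fun (k : Nat) => (k : Int))).filter (fun j => decide (j < index)))).getLast? with
    | none => left; rw [hx, hgl]
    | some a =>
      right
      have ha : a ∈ (((List.range pushV.length).filter (fun k => (pushV.getD k none).isSome)).map (fun (k : Nat) => (k : Int))).filter (fun j => decide (j < index)) :=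
        List.mem_of_getLast? hgl
      rw [List.mem_filter] at ha
      obtain ⟨ha1, _⟩ := ha
      rw [List.mem_map] at ha1
      obtain ⟨k, _, rfl⟩ := ha1
      exact ⟨k, by rw [hx]; exact hgl⟩
  · rw [List.mem_map] at hx
    obtain ⟨j, hj, rfl⟩ := hx
    rw [List.mem_filter] at hj
    obtain ⟨hj1, _⟩ := hj
    rw [List.mem_map] at hj1
    obtain ⟨k, _, rfl⟩ := hj1
    exact Or.inr ⟨k, rfl⟩

-- ===== VERDICT =====
theorem get_maybe_spec : Claim_unchanged_get_maybe := by
  intro index pushV _ hpre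
  unfold Spec_get_maybe
  intro hnD
  unfold Pre_get_maybe at hpre
  unfold D_get_maybe at hnD
  exact get_maybe_agree index pushV hpre.1 hpre.2 hnD

theorem get_maybe_changed : Claim_changed_get_maybe := by
  unfold Claim_changed_get_maybe
  refine ⟨by decide, by decide, by decide, ?_, by decide, by decide⟩
  show get_maybe (-2) [some 5] = [none, some (-1), some 0]
  rw [get_maybe, loopBack.eq_def, loopFwd.eq_def]
  norm_num [PySem.List.pyGet?, PySem.List.pyIdx?]
  rw [loopFwd.eq_def]
  norm_num [PySem.List.pyGet?, PySem.List.pyIdx?]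
  rw [loopFwd.eq_def]
  norm_num

theorem get_maybe_tight : Claim_exact_get_maybe := by
  intro index pushV _ hpre hD heq
  unfold Pre_get_maybe at hpre
  unfold D_get_maybe at hD
  obtain ⟨hle, hlo, hany⟩ := hD
  rw [List.any_eq_true] at hany
  obtain ⟨o, ho, hsome⟩ := hany
  obtain ⟨q, hq, hoq⟩ := List.getElem_of_mem ho
  rw [List.getElem_drop] at hoq
  set p0 : Nat := ((pushV.length : Int) + index + 1).toNat with hp0
  have hqlen : p0 + q < pushV.length := by
    have := List.length_drop (l := pushV) (i := p0)
    omega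
  obtain ⟨v, hv⟩ : ∃ v, o = some v := by
    cases o with
    | none => simp at hsome
    | some v => exact ⟨v, rfl⟩
  -- the wrapped (negative) index A appends
  set j' : Int := ((p0 + q : Nat) : Int) - (pushV.length : Int) with hj'
  have hj'neg : j' < 0 := by omega
  have hj'lo : index + 1 ≤ j' := by omega
  have hget : PySem.List.pyGet? pushV j' = some (some v) := by
    have hk1 : 0 < (pushV.length - (p0 + q)) := by omega
    have hk2 : pushV.length - (p0 + q) ≤ pushV.length := by omega
    have hjc : j' = -(((pushV.length - (p0 + q) : Nat) : Int)) := by omega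
    have hlt2 : pushV.length - (pushV.length - (p0 + q)) < pushV.length := by omega
    conv_lhs => rw [hjc]
    rw [PySem.List.pyGet?_neg_natCast pushV _ hk1 hk2, List.getElem?_eq_getElem hlt2]
    have : pushV.length - (pushV.length - (p0 + q)) = p0 + q := by omega
    rw [show pushV[pushV.length - (pushV.length - (p0 + q))]'hlt2 = pushV[p0 + q]'hqlen from by congr 1, hoq, hv]
  have hmem : some j' ∈ get_maybe index pushV := by
    unfold get_maybe
    exact loopFwd_mem_hit pushV ((pushV.length : Int) - (index + 1)).toNat (index + 1) _ rfl
      (by omega) j' v hj'lo hj'neg hget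
  rw [heq] at hmem
  rcases mem_alt_shape index pushV (some j') hmem with h | ⟨k, hk⟩
  · simp at h
  · have : j' = (k : Int) := Option.some.inj hk
    omega
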